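-- pv_equiv track=rewrite | github.com/conda-forge/conda-smithy | conda_smithy/rattler_linter.py | _is_keys_in_order
-- ===== SOURCE A (Python) =====
-- def _is_keys_in_order(input_dict, expected_order):
--     # Filter the keys of the input dictionary based on the expected order
--     filtered_keys = [key for key in expected_order if key in input_dict]
--
--     # Create a list of the keys in the input dictionary in their actual order
--     actual_keys = list(input_dict.keys())
--
--     # Check if the filtered keys are in the same order as they appear in the actual keys
--     index = 0
--     for key in filtered_keys:
--         try:
--             index = actual_keys.index(key, index)
--         except ValueError:
--             return False
--         index += 1
--
--     return True
-- ===== SOURCE B (Python) =====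
-- def _is_keys_in_order(input_dict, expected_order):
--     # Project onto the common keys from both sides and compare the orders directly.
--     expected_proj = [k for k in expected_order if k in input_dict]
--     expected_set = set(expected_order)
--     actual_proj = [k for k in input_dict if k in expected_set]
--     return expected_proj == actual_proj
-- ===== Notes on version B (the rewrite author's own statement) =====
-- stated objective: simpler
-- what changed: Replaces the advancing-index greedy scan with try/except over actual_keys.index by two filtered key projections (expected-order side via dict membership, dict-order side via a set of expected_order) compared with one list equality.
import Mathlib
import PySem

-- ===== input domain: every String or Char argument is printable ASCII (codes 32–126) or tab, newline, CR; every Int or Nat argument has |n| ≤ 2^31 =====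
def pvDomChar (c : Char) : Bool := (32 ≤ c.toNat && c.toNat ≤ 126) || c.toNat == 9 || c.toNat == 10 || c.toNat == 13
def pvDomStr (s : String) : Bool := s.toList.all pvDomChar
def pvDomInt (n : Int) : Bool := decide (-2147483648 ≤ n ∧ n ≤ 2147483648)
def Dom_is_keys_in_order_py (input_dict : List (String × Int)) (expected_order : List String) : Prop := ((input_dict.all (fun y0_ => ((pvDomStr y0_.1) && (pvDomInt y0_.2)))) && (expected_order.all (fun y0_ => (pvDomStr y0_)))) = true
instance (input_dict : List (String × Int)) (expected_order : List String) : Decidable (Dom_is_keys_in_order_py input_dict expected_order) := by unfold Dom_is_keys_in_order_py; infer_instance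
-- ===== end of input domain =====

-- B replaces A's advancing-index scan (actual_keys.index(key, index) with try/except) by two
-- filtered key projections compared with one list equality; objective: simpler.

-- ===== PORT A =====
-- actual_keys.index(key, index): first position ≥ index holding key (exact for the 0 ≤ index ≤ len
-- values A produces; ported via drop + PySem.List.index?, re-offset by the start).
def pvIdxFrom (a : List String) (k : String) (i : Nat) : Option Nat :=
  (PySem.List.index? (a.drop i) k).map (fun j => i + j)

-- the 'for key in filtered_keys' loop with its advancing index and try/except → early return False
def pvLoopA (filtered actual : List String) (index : Nat) : Bool :=
  match filtered with
  | [] => true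
  | k :: rest =>
    match pvIdxFrom actual k index with
    | none => false
    | some i => pvLoopA rest actual (i + 1)

def is_keys_in_order_py (input_dict : List (String × Int)) (expected_order : List String) : Bool :=
  -- 'key in input_dict' = key among the dict's keys; list(input_dict.keys()) = first-occurrence dedup
  let filtered_keys := expected_order.filter (fun key => (input_dict.map Prod.fst).contains key)
  let actual_keys := PySem.List.dedup (input_dict.map Prod.fst)
  pvLoopA filtered_keys actual_keys 0

-- ===== PORT B =====
def is_keys_in_order_py_alt (input_dict : List (String × Int)) (expected_order : List String) : Bool :=
  let expected_proj := expected_order.filter (fun k => (input_dict.map Prod.fst).contains k)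
  let expected_set := PySem.Set.ofList expected_order
  -- 'for k in input_dict' iterates the dict's keys (first-occurrence dedup)
  let actual_proj := (PySem.List.dedup (input_dict.map Prod.fst)).filter (fun k => PySem.Set.contains expected_set k)
  expected_proj == actual_proj

-- ===== PRECONDITION & SPEC =====
def Spec_is_keys_in_order_py (input_dict : List (String × Int)) (expected_order : List String) (out : Bool) : Prop := out = is_keys_in_order_py_alt input_dict expected_order
instance (input_dict : List (String × Int)) (expected_order : List String) (out : Bool) : Decidable (Spec_is_keys_in_order_py input_dict expected_order out) := by unfold Spec_is_keys_in_order_py; infer_instance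

-- ===== CLAIM (what is proved, stated in full; the proofs are below) =====
def Claim_equal_is_keys_in_order_py : Prop := ∀ (input_dict : List (String × Int)) (expected_order : List String), Dom_is_keys_in_order_py input_dict expected_order → Spec_is_keys_in_order_py input_dict expected_order (is_keys_in_order_py input_dict expected_order)

-- ===== LEMMAS AND PROOFS =====

-- a ≠ head: prepending the head does not help a sublist starting with k
theorem cons_sublist_cons_of_ne {α : Type} {k a : α} {rest d : List α} (hne : a ≠ k) :
    List.Sublist (k :: rest) (a :: d) ↔ List.Sublist (k :: rest) d := by
  constructor
  · intro h
    rcases List.sublist_cons_iff.mp h with h' | ⟨r, hr, hs⟩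
    · exact h'
    · cases hr; exact absurd rfl hne
  · intro h; exact h.cons a

-- greedy step: with j the FIRST index of k in d, k::rest <+ d ↔ rest <+ d.drop (j+1)
theorem cons_sublist_iff_index? {k : String} {rest : List String} :
    ∀ {d : List String} {j : Nat}, PySem.List.index? d k = some j →
      (List.Sublist (k :: rest) d ↔ List.Sublist rest (d.drop (j + 1)))
  | [], j => by simp [PySem.List.index?]
  | a :: d', j => by
    intro h
    by_cases hak : a = k
    · subst hak
      rw [PySem.List.index?_cons_self] at h
      cases h
      simp only [List.drop_succ_cons, List.drop_zero]
      exact List.cons_sublist_cons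
    · rw [PySem.List.index?_cons_of_ne d' hak] at h
      rcases Option.map_eq_some_iff.mp h with ⟨j', hj', rfl⟩
      rw [cons_sublist_cons_of_ne hak]
      simpa using cons_sublist_iff_index? hj'

-- A's loop is the greedy subsequence test: it accepts iff filtered <+ actual.drop index
theorem pvLoopA_iff_sublist (f : List String) :
    ∀ (a : List String) (i : Nat), pvLoopA f a i = true ↔ List.Sublist f (a.drop i) := by
  induction f with
  | nil => intro a i; simp [pvLoopA]
  | cons k rest ih =>
    intro a i
    unfold pvLoopA pvIdxFrom
    cases h : PySem.List.index? (a.drop i) k with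
    | none =>
      have hk : k ∉ a.drop i := (PySem.List.index?_eq_none_iff _ _).mp h
      simp only [Option.map_none]
      constructor
      · intro hf; cases hf
      · intro hs; exact absurd (hs.subset List.mem_cons_self) hk
    | some j =>
      simp only [Option.map_some]
      rw [ih a (i + j + 1)]
      have : a.drop (i + j + 1) = (a.drop i).drop (j + 1) := by
        rw [List.drop_drop]; ring_nf
      rw [this, ← cons_sublist_iff_index? h]

-- a Nodup list, filtered to the members of one of its sublists, gives back that sublist
theorem filter_mem_of_sublist {f l : List String} (hl : l.Nodup) (h : List.Sublist f l) :
    l.filter (fun x => decide (x ∈ f)) = f := by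
  induction h with
  | slnil => rfl
  | @cons l₁ l₂ a h ih =>
    have ha : a ∉ l₂ := (List.nodup_cons.mp hl).1
    have h2 : l₂.Nodup := (List.nodup_cons.mp hl).2
    have haf : a ∉ l₁ := fun hm => ha (h.subset hm)
    simpa [List.filter_cons, haf] using ih h2
  | @cons₂ l₁ l₂ a h ih =>
    have ha : a ∉ l₂ := (List.nodup_cons.mp hl).1
    have h2 : l₂.Nodup := (List.nodup_cons.mp hl).2
    have hcg : l₂.filter (fun x => decide (x ∈ a :: l₁)) = l₂.filter (fun x => decide (x ∈ l₁)) := by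
      apply List.filter_congr
      intro x hx
      have hxa : x ≠ a := fun hh => ha (hh ▸ hx)
      simp [hxa]
    have hacond : (decide (a ∈ a :: l₁)) = true := by simp
    rw [List.filter_cons, hacond, if_pos rfl, hcg, ih h2]

-- the two projections agree iff the expected-side projection is a sublist of the (Nodup) key list
theorem proj_eq_iff_sublist (l eo : List String) (hl : l.Nodup) :
    List.Sublist (eo.filter (fun k => decide (k ∈ l))) l ↔
      eo.filter (fun k => decide (k ∈ l)) = l.filter (fun k => decide (k ∈ eo)) := by
  constructor
  · intro h
    rw [← filter_mem_of_sublist hl h]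
    apply List.filter_congr
    intro x hx
    simp only [decide_eq_decide, List.mem_filter, decide_eq_true_eq]
    constructor
    · exact fun ⟨h1, _⟩ => h1
    · exact fun h1 => ⟨h1, hx⟩
  · intro h; rw [h]; exact List.filter_sublist

-- ===== VERDICT (by name: the statement is the Claim_ definition above) =====
theorem is_keys_in_order_py_spec : Claim_equal_is_keys_in_order_py := by
  intro input_dict expected_order _
  unfold Spec_is_keys_in_order_py is_keys_in_order_py is_keys_in_order_py_alt
  simp only
  set m := input_dict.map Prod.fst with hm
  have hmem : ∀ k : String, (m.contains k) = decide (k ∈ PySem.List.dedup m) := by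
    intro k; simp
  have hmem2 : ∀ k : String, (PySem.Set.contains (PySem.Set.ofList expected_order) k) = decide (k ∈ expected_order) := by
    intro k; simp [PySem.Set.contains, PySem.Set.mem_ofList]
  rw [List.filter_congr (fun k _ => hmem k),
      List.filter_congr (fun k _ => hmem2 k)]
  rw [Bool.eq_iff_iff, pvLoopA_iff_sublist, List.drop_zero, beq_iff_eq]
  exact proj_eq_iff_sublist _ _ (PySem.List.nodup_dedup m)
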